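-- pv_equiv track=rewrite | github.com/sarospa/project-euler-python | euler-116.py | count_tile_combos
-- ===== SOURCE A (Python) =====
-- cache = dict()
--
-- def count_tile_combos(n, m):
-- 	if (n, m) in cache:
-- 		return cache[(n, m)]
-- 	total = 0
-- 	for pos in range(0, n - m + 1):
-- 		total += count_tile_combos(n - (pos + m), m) + 1
-- 	cache[(n, m)] = total
-- 	return total
-- ===== SOURCE B (Python) =====
-- def count_tile_combos(n, m):
--     if n < m:
--         return 0
--     f = [0] * m
--     for k in range(m, n + 1):
--         f.append(f[k - 1] + f[k - m] + 1)
--     return f[n]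
-- ===== Notes on version B (the rewrite author's own statement) =====
-- stated objective: alternative
-- what changed: A computes f(n) recursively as a sum of n-m+1 recursive calls (memoised in a module-level dict); B runs a single bottom-up loop filling a DP table with the recurrence f(k) = f(k-1) + f(k-m) + 1.
import Mathlib
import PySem

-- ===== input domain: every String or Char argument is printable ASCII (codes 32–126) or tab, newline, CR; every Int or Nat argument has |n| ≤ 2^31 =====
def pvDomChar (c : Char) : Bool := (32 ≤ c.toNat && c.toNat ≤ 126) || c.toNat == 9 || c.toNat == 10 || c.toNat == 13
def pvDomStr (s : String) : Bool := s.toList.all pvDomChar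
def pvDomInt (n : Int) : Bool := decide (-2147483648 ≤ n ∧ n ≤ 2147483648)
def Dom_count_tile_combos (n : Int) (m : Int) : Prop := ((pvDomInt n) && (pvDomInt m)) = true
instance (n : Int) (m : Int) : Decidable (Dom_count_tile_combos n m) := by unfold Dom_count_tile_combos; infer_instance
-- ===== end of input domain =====

-- B replaces A's memoised recursive summation by a single bottom-up DP loop
-- using the recurrence f(k) = f(k-1) + f(k-m) + 1 (alternative algorithm, same result).

-- ===== PORT A =====
-- A is a recursive function memoised in a module-level dict; the cache is threaded through
-- as a PySem.Dict (each top-level call starts it empty: memoisation does not change the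
-- returned value), and the recursion is ported with a fuel parameter, (n+1).toNat being
-- enough fuel whenever the Python recursion terminates (m ≥ 1, each call strictly decreases n).
def countTileCombosFuel :
    Nat → Int → Int → PySem.Dict (Int × Int) Int → Int × PySem.Dict (Int × Int) Int
  | 0, _, _, c => (0, c)
  | fuel+1, n, m, c =>
      match c.get? (n, m) with
      | some v => (v, c)
      | none =>
          let r := (PySem.List.pyRange 0 (n - m + 1) 1).foldl
            (fun (acc : Int × PySem.Dict (Int × Int) Int) pos =>
              let r' := countTileCombosFuel fuel (n - (pos + m)) m acc.2
              (acc.1 + r'.1 + 1, r'.2))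
            (0, c)
          (r.1, r.2.insert (n, m) r.1)

def count_tile_combos (n : Int) (m : Int) : Int :=
  (countTileCombosFuel (n + 1).toNat n m PySem.Dict.empty).1

-- ===== PORT B =====
-- f[k-1] / f[k-m] are ported with pyGetD; under Pre_ both indices are always in range,
-- where pyGetD is exact Python indexing.
def count_tile_combos_alt (n : Int) (m : Int) : Int :=
  if n < m then 0
  else
    let f := (PySem.List.pyRange m (n + 1) 1).foldl
      (fun f k => f ++ [PySem.List.pyGetD f (k - 1) 0 + PySem.List.pyGetD f (k - m) 0 + 1])
      (List.replicate m.toNat 0)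
    PySem.List.pyGetD f n 0

-- ===== PRECONDITION & SPEC =====
-- Pre_ excludes exactly the inputs where A raises: for m ≤ 0 with n ≥ m the recursion
-- never reaches a base case and Python dies with RecursionError.
def Pre_count_tile_combos (n : Int) (m : Int) : Prop := 1 ≤ m ∨ n < m
instance (n : Int) (m : Int) : Decidable (Pre_count_tile_combos n m) := by
  unfold Pre_count_tile_combos; infer_instance

def pvWitness_count_tile_combos : Int × Int := (10, 2)

def Spec_count_tile_combos (n : Int) (m : Int) (out : Int) : Prop := out = count_tile_combos_alt n m
instance (n : Int) (m : Int) (out : Int) : Decidable (Spec_count_tile_combos n m out) := by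
  unfold Spec_count_tile_combos; infer_instance

-- ===== CLAIM (what is proved, stated in full; the proofs are below) =====
def Claim_equal_count_tile_combos : Prop := ∀ (n : Int) (m : Int), Dom_count_tile_combos n m → Pre_count_tile_combos n m → Spec_count_tile_combos n m (count_tile_combos n m)

-- ===== LEMMAS AND PROOFS =====

-- The mathematical value both programs compute: the DP recurrence.
def gTile (m : Int) : Nat → Int
  | k =>
    if h : (k : Int) < m ∨ m < 1 then 0
    else gTile m (k - 1) + gTile m (k - m.toNat) + 1
termination_by k => k
decreasing_by
  · push_neg at h; omega
  · push_neg at h; omega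

def GTile (m n : Int) : Int := if n < 0 then 0 else gTile m n.toNat

lemma gTile_base (m : Int) (k : Nat) (h : (k : Int) < m ∨ m < 1) : gTile m k = 0 := by
  rw [gTile]; simp [h]

lemma gTile_step (m : Int) (k : Nat) (h1 : 1 ≤ m) (h2 : m ≤ (k : Int)) :
    gTile m k = gTile m (k - 1) + gTile m (k - m.toNat) + 1 := by
  rw [gTile]
  have : ¬ ((k : Int) < m ∨ m < 1) := by omega
  simp [this]

-- closed summation form of gTile at m + t
lemma gTile_sum (m : Int) (hm : 1 ≤ m) (t : Nat) :
    gTile m (t + m.toNat) =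
      ((List.range (t + 1)).map (fun j => gTile m j)).sum + (t + 1) := by
  induction t with
  | zero =>
      have h0 : gTile m m.toNat = gTile m (m.toNat - 1) + gTile m (m.toNat - m.toNat) + 1 :=
        gTile_step m m.toNat hm (by omega)
      simp only [Nat.zero_add]
      rw [h0, gTile_base m (m.toNat - 1) (Or.inl (by omega)),
          gTile_base m (m.toNat - m.toNat) (Or.inl (by omega))]
      simp [gTile_base m 0 (Or.inl (by omega))]
  | succ t ih =>
      have h0 : gTile m (t + 1 + m.toNat) = gTile m (t + m.toNat) + gTile m (t + 1) + 1 := by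
        have := gTile_step m (t + 1 + m.toNat) hm (by push_cast; omega)
        simpa [Nat.add_sub_cancel] using this
      have hr : ((List.range (t + 1 + 1)).map (fun j => gTile m j)).sum
          = ((List.range (t + 1)).map (fun j => gTile m j)).sum + gTile m (t + 1) := by
        rw [List.range_succ, List.map_append, List.sum_append]; simp
      rw [h0, ih, hr]; push_cast; ring

-- reflecting a range-sum
lemma sum_map_range_reflect (F : Nat → Int) (t : Nat) :
    ((List.range (t + 1)).map (fun p => F (t - p))).sum = ((List.range (t + 1)).map F).sum := by
  induction t with
  | zero => simp
  | succ t ih =>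
      have hl : (List.range (t + 1 + 1)).map (fun p => F (t + 1 - p))
          = F (t + 1) :: (List.range (t + 1)).map (fun p => F (t - p)) := by
        rw [List.range_succ_eq_map, List.map_cons, List.map_map]
        congr 1
        exact List.map_congr_left (fun p _ => by
          simp only [Function.comp_apply]; congr 1; omega)
      have hr : ((List.range (t + 1 + 1)).map F).sum
          = ((List.range (t + 1)).map F).sum + F (t + 1) := by
        rw [List.range_succ, List.map_append, List.sum_append, List.map_singleton,
            List.sum_singleton]
      rw [hl, List.sum_cons, ih, hr]
      ring

-- cache invariant: every memoised entry holds the true value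
def cacheOK (c : PySem.Dict (Int × Int) Int) : Prop :=
  ∀ p v, c.get? p = some v → v = GTile p.2 p.1

lemma GTile_lt (n m : Int) (h : n < m) : GTile m n = 0 := by
  rw [GTile]
  split
  · rfl
  · exact gTile_base m n.toNat (Or.inl (by omega))

-- A's memoised recursion computes GTile when the fuel exceeds n
lemma countA_eq (m : Int) (hm : 1 ≤ m) :
    ∀ (fuel : Nat) (n : Int) (c : PySem.Dict (Int × Int) Int), n < (fuel : Int) → cacheOK c →
      (countTileCombosFuel fuel n m c).1 = GTile m n ∧
        cacheOK (countTileCombosFuel fuel n m c).2 := by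
  intro fuel
  induction fuel with
  | zero =>
      intro n c h hOK
      simp only [Nat.cast_zero] at h
      rw [countTileCombosFuel]
      exact ⟨by rw [GTile, if_pos h], hOK⟩
  | succ fuel ih =>
      intro n c h hOK
      rw [countTileCombosFuel]
      cases hc : c.get? (n, m) with
      | some v => exact ⟨hOK (n, m) v hc, hOK⟩
      | none =>
          simp only []
          have haux : ∀ (l : List Int), (∀ pos ∈ l, n - (pos + m) < (fuel : Int)) →
              ∀ (a : Int) (c0 : PySem.Dict (Int × Int) Int), cacheOK c0 →
              (l.foldl
                (fun (acc : Int × PySem.Dict (Int × Int) Int) pos =>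
                  let r' := countTileCombosFuel fuel (n - (pos + m)) m acc.2
                  (acc.1 + r'.1 + 1, r'.2)) (a, c0)).1
                = a + (l.map (fun pos => GTile m (n - (pos + m)) + 1)).sum ∧
              cacheOK (l.foldl
                (fun (acc : Int × PySem.Dict (Int × Int) Int) pos =>
                  let r' := countTileCombosFuel fuel (n - (pos + m)) m acc.2
                  (acc.1 + r'.1 + 1, r'.2)) (a, c0)).2 := by
            intro l
            induction l with
            | nil => intro _ a c0 h0; exact ⟨by simp, h0⟩
            | cons x xs ihl =>
                intro hb a c0 h0
                have hx := ih (n - (x + m)) c0 (hb x (List.mem_cons_self)) h0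
                rw [List.foldl_cons]
                obtain ⟨h1, h2⟩ := ihl (fun pos hp => hb pos (List.mem_cons_of_mem _ hp))
                  (a + (countTileCombosFuel fuel (n - (x + m)) m c0).1 + 1)
                  (countTileCombosFuel fuel (n - (x + m)) m c0).2 hx.2
                refine ⟨?_, h2⟩
                rw [h1, hx.1, List.map_cons, List.sum_cons]
                ring
          obtain ⟨h1, h2⟩ := haux (PySem.List.pyRange 0 (n - m + 1) 1)
            (fun pos hp => by
              have hpr := (PySem.List.mem_pyRange_one).mp hp
              push_cast at h ⊢; omega)
            0 c hOK
          have hval : (0 : Int) + ((PySem.List.pyRange 0 (n - m + 1) 1).map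
              (fun pos => GTile m (n - (pos + m)) + 1)).sum = GTile m n := by
            by_cases hnm : n < m
            · rw [PySem.List.pyRange_one_eq_nil (by omega), List.map_nil, List.sum_nil,
                  GTile_lt n m hnm]
              simp
            · push_neg at hnm
              set t : Nat := (n - m).toNat with ht
              have hrange : n - m + 1 = ((t + 1 : Nat) : Int) := by push_cast; omega
              rw [hrange, PySem.List.pyRange_zero_natCast, List.map_map]
              have hmapeq : (List.range (t + 1)).map
                    ((fun pos => GTile m (n - (pos + m)) + 1) ∘ (fun k : Nat => (k : Int)))
                  = (List.range (t + 1)).map (fun p => gTile m (t - p) + 1) := by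
                refine List.map_congr_left (fun p hp => ?_)
                have hpt : p ≤ t := by have := List.mem_range.mp hp; omega
                simp only [Function.comp]
                have harg : n - ((p : Int) + m) = ((t - p : Nat) : Int) := by push_cast; omega
                rw [harg, GTile]
                simp
              rw [hmapeq]
              have hsplit : ((List.range (t + 1)).map (fun p => gTile m (t - p) + 1)).sum
                  = ((List.range (t + 1)).map (fun p => gTile m (t - p))).sum + (t + 1) := by
                rw [PySem.List.sum_map_add_int (f := fun p => gTile m (t - p)) (g := fun _ => 1)]
                congr 1
                rw [PySem.List.sum_map_const_int]
                simp
              rw [hsplit, sum_map_range_reflect]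
              have hts := gTile_sum m hm t
              rw [GTile, if_neg (by omega)]
              have hnt : n.toNat = t + m.toNat := by omega
              rw [hnt, hts]
              ring
          refine ⟨by rw [h1, hval], ?_⟩
          intro p v hp
          rw [PySem.Dict.get?_insert] at hp
          by_cases hpk : p = (n, m)
          · rw [if_pos hpk] at hp
            cases hp
            rw [h1, hval, hpk]
          · rw [if_neg hpk] at hp
            exact h2 p v hp

-- B's DP loop invariant: after processing range(m, m+t) the table holds gTile 0..m+t-1
lemma foldB (m : Int) (hm : 1 ≤ m) (t : Nat) :
    (PySem.List.pyRange m (m + (t : Int)) 1).foldl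
        (fun f k => f ++ [PySem.List.pyGetD f (k - 1) 0 + PySem.List.pyGetD f (k - m) 0 + 1])
        (List.replicate m.toNat 0)
      = (List.range (m.toNat + t)).map (fun j => gTile m j) := by
  induction t with
  | zero =>
      rw [PySem.List.pyRange_one_eq_nil (by omega), List.foldl_nil]
      symm
      rw [List.eq_replicate_iff]
      constructor
      · simp
      · intro b hb
        obtain ⟨j, hj, rfl⟩ := List.mem_map.mp hb
        exact gTile_base m j (by have := List.mem_range.mp hj; omega)
  | succ t ih =>
      have hsr : m + ((t : Int) + 1) = (m + (t : Int)) + 1 := by ring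
      rw [show ((t + 1 : Nat) : Int) = (t : Int) + 1 by push_cast; ring, hsr,
          PySem.List.pyRange_one_succ_right (by omega), List.foldl_append, ih, List.foldl_cons,
          List.foldl_nil]
      have hlen : ((List.range (m.toNat + t)).map (fun j => gTile m j)).length = m.toNat + t := by
        simp
      have hg1 : PySem.List.pyGetD ((List.range (m.toNat + t)).map (fun j => gTile m j))
            (m + (t : Int) - 1) 0 = gTile m (m.toNat + t - 1) := by
        rw [PySem.List.pyGetD_eq_getElem _ _ (by omega) (by simp <;> omega)]
        have hi : (m + (t : Int) - 1).toNat = m.toNat + t - 1 := by omega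
        simp [hi]
      have hg2 : PySem.List.pyGetD ((List.range (m.toNat + t)).map (fun j => gTile m j))
            (m + (t : Int) - m) 0 = gTile m t := by
        rw [PySem.List.pyGetD_eq_getElem _ _ (by omega) (by simp <;> omega)]
        have hi : (m + (t : Int) - m).toNat = t := by omega
        simp [hi]
      rw [hg1, hg2]
      have hstep : gTile m (m.toNat + t) = gTile m (m.toNat + t - 1) + gTile m t + 1 := by
        have harg : m.toNat + t - m.toNat = t := by omega
        rw [gTile_step m (m.toNat + t) hm (by push_cast; omega), harg]
      rw [show m.toNat + (t + 1) = (m.toNat + t) + 1 by ring, List.range_succ, List.map_append,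
          List.map_singleton, hstep]

lemma altB_eq (n m : Int) (hm : 1 ≤ m) (hnm : m ≤ n) :
    count_tile_combos_alt n m = GTile m n := by
  rw [count_tile_combos_alt, if_neg (by omega)]
  set t : Nat := (n + 1 - m).toNat with ht
  have hr : n + 1 = m + (t : Int) := by omega
  simp only [hr]
  rw [foldB m hm t]
  have hlen : ((List.range (m.toNat + t)).map (fun j => gTile m j)).length = m.toNat + t := by simp
  rw [PySem.List.pyGetD_eq_getElem _ _ (by omega) (by simp <;> omega)]
  rw [GTile, if_neg (by omega)]
  simp

-- ===== VERDICT (by name: the statement is the Claim_ definition above) =====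
theorem count_tile_combos_spec : Claim_equal_count_tile_combos := by
  intro n m _ hpre
  unfold Spec_count_tile_combos
  by_cases hm : 1 ≤ m
  · have hOK : cacheOK PySem.Dict.empty := by
      intro p v hp
      simp [PySem.Dict.empty, PySem.Dict.get?] at hp
    have hfuel : n < (((n + 1).toNat : Nat) : Int) := by omega
    have hA := countA_eq m hm (n + 1).toNat n PySem.Dict.empty hfuel hOK
    rw [count_tile_combos, hA.1]
    by_cases hnm : n < m
    · rw [GTile_lt n m hnm, count_tile_combos_alt, if_pos hnm]
    · push_neg at hnm
      rw [altB_eq n m hm hnm]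
  · have hnm : n < m := by
      rcases hpre with h | h
      · omega
      · exact h
    have hn0 : n < 0 := by omega
    have hfuel : (n + 1).toNat = 0 := by omega
    rw [count_tile_combos, hfuel, countTileCombosFuel, count_tile_combos_alt, if_pos hnm]
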